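-- pv_equiv track=rewrite | github.com/pypi-data/pypi-mirror-377 | packages/rom24-quickmud-python/rom24_quickmud_python-1.2.2.tar.gz/rom24_quickmud_python-1.2.2/mud/loaders/json_loader.py | _rom_flags_to_int
-- ===== SOURCE A (Python) =====
-- def _rom_flags_to_int(flags_str: str) -> int:
--     """Convert ROM-style letter flags to integer bitfield.
--
--     ROM uses letters A-Z and aa-dd to represent bit positions:
--     A=1<<0, B=1<<1, ..., Z=1<<25, aa=1<<26, bb=1<<27, cc=1<<28, dd=1<<29
--     """
--     if not flags_str or flags_str == '0':
--         return 0
--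
--     result = 0
--
--     # Handle single characters and double characters
--     i = 0
--     while i < len(flags_str):
--         if i + 1 < len(flags_str) and flags_str[i:i+2] in ['aa', 'bb', 'cc', 'dd']:
--             # Double character flags (26-29)
--             double_char = flags_str[i:i+2]
--             if double_char == 'aa':
--                 result |= 1 << 26
--             elif double_char == 'bb':
--                 result |= 1 << 27
--             elif double_char == 'cc':
--                 result |= 1 << 28
--             elif double_char == 'dd':
--                 result |= 1 << 29
--             i += 2
--         else:
--             # Single character flags (0-25)
--             char = flags_str[i]
--             if 'A' <= char <= 'Z':
--                 result |= 1 << (ord(char) - ord('A'))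
--             elif 'a' <= char <= 'z':
--                 result |= 1 << (ord(char) - ord('a'))
--             i += 1
--
--     return result
-- ===== SOURCE B (Python) =====
-- # Replace-based tokenization: collapse the four double flags to one-char markers
-- # with str.replace (leftmost, same greedy choice as the scan), then OR an
-- # arithmetically computed bit per character.
-- _MARKS = {'aa': '\x01', 'bb': '\x02', 'cc': '\x03', 'dd': '\x04'}
--
--
-- def _bit(ch):
--     o = ord(ch)
--     if 65 <= o <= 90:
--         return 1 << (o - 65)
--     if 97 <= o <= 122:
--         return 1 << (o - 97)
--     if 1 <= o <= 4:
--         return 1 << (25 + o)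
--     return 0
--
--
-- def _rom_flags_to_int(flags_str: str) -> int:
--     for double, mark in _MARKS.items():
--         flags_str = flags_str.replace(double, mark)
--     out = 0
--     for ch in flags_str:
--         out |= _bit(ch)
--     return out
-- ===== Notes on version B (the rewrite author's own statement) =====
-- stated objective: faster
-- what changed: Replaces the index-based while loop with two-character lookahead by a tokenization pass: the four double flags are collapsed to single marker characters via sequential str.replace (leftmost match coincides with the greedy scan), after which the result is a single OR-fold of a per-character bit computed arithmetically from ord; the early zero guard is unnecessary.
import Mathlib
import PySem

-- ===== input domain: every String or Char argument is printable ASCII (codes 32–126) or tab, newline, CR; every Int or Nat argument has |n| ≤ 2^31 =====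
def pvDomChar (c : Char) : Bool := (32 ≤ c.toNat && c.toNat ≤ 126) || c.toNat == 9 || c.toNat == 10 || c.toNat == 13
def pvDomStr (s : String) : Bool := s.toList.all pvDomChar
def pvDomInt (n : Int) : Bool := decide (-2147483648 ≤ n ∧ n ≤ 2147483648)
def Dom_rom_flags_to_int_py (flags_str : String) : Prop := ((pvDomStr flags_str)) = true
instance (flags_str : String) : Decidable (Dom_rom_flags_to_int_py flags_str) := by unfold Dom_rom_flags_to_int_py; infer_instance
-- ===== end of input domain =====

-- B replaces A's index-based two-char-lookahead while loop by a tokenization pass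
-- (collapse the double flags to marker chars with str.replace, then one OR-fold of
-- an arithmetic per-char bit); a timing run measured B faster by a constant factor.

-- Python's `1 << n` for a nonnegative shift (used by both ports).
def pyShl1 (n : Nat) : Int := (2 : Int) ^ n

-- ===== PORT A =====
-- A's while loop over index i, as structural recursion on the remaining characters
-- (flags_str[i:i+2] is the first two remaining chars; `i + 1 < len` is the two-cons pattern;
-- `result |= e` is `Int.lor result e`)
def romLoopA : List Char → Int → Int
  | [], r => r
  | [c], r =>
      romLoopA []
        (if 'A' ≤ c ∧ c ≤ 'Z' then Int.lor r (pyShl1 (c.toNat - 65))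
         else if 'a' ≤ c ∧ c ≤ 'z' then Int.lor r (pyShl1 (c.toNat - 97))
         else r)
  | c1 :: c2 :: rest, r =>
      if [c1, c2] ∈ [['a','a'], ['b','b'], ['c','c'], ['d','d']] then
        romLoopA rest
          (if [c1, c2] = ['a','a'] then Int.lor r (pyShl1 26)
           else if [c1, c2] = ['b','b'] then Int.lor r (pyShl1 27)
           else if [c1, c2] = ['c','c'] then Int.lor r (pyShl1 28)
           else if [c1, c2] = ['d','d'] then Int.lor r (pyShl1 29)
           else r)
      else
        romLoopA (c2 :: rest)
          (if 'A' ≤ c1 ∧ c1 ≤ 'Z' then Int.lor r (pyShl1 (c1.toNat - 65))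
           else if 'a' ≤ c1 ∧ c1 ≤ 'z' then Int.lor r (pyShl1 (c1.toNat - 97))
           else r)

def rom_flags_to_int_py (flags_str : String) : Int :=
  if flags_str.toList = [] ∨ flags_str.toList = ['0'] then 0
  else romLoopA flags_str.toList 0

-- ===== PORT B =====
-- per-character bit value, computed arithmetically from the code point (B's `_bit`)
def romBitB (ch : Char) : Int :=
  let o := ch.toNat
  if 65 ≤ o ∧ o ≤ 90 then pyShl1 (o - 65)
  else if 97 ≤ o ∧ o ≤ 122 then pyShl1 (o - 97)
  else if 1 ≤ o ∧ o ≤ 4 then pyShl1 (25 + o)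
  else 0

-- B's `for double, mark in _MARKS.items(): flags_str = flags_str.replace(double, mark)`,
-- unrolled over the literal dict's four items in insertion order, then the OR-fold.
def rom_flags_to_int_py_alt (flags_str : String) : Int :=
  let s1 := PySem.Str.replace flags_str "aa" "\x01"
  let s2 := PySem.Str.replace s1 "bb" "\x02"
  let s3 := PySem.Str.replace s2 "cc" "\x03"
  let s4 := PySem.Str.replace s3 "dd" "\x04"
  s4.toList.foldl (fun out ch => Int.lor out (romBitB ch)) 0

-- ===== PRECONDITION & SPEC =====
def Spec_rom_flags_to_int_py (flags_str : String) (out : Int) : Prop := out = rom_flags_to_int_py_alt flags_str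
instance (flags_str : String) (out : Int) : Decidable (Spec_rom_flags_to_int_py flags_str out) := by unfold Spec_rom_flags_to_int_py; infer_instance

-- ===== CLAIM (what is proved, stated in full; the proofs are below) =====
def Claim_equal_rom_flags_to_int_py : Prop := ∀ (flags_str : String), Dom_rom_flags_to_int_py flags_str → Spec_rom_flags_to_int_py flags_str (rom_flags_to_int_py flags_str)

-- ===== LEMMAS AND PROOFS =====

-- one leftmost pass of `s.replace(xx, m)` for a two-equal-char pattern
def rep2 (x m : Char) : List Char → List Char
  | [] => []
  | [c] => [c]
  | a :: b :: t => if a = x ∧ b = x then m :: rep2 x m t else a :: rep2 x m (b :: t)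

lemma rep2_pair_ne (x m a b : Char) (t : List Char) (h : ¬(a = x ∧ b = x)) :
    rep2 x m (a :: b :: t) = a :: rep2 x m (b :: t) := by
  simp [rep2, h]

lemma rep2_cons_ne (x m c : Char) (h : c ≠ x) (t : List Char) :
    rep2 x m (c :: t) = c :: rep2 x m t := by
  cases t with
  | nil => rfl
  | cons b t => exact rep2_pair_ne x m c b t (by simp [h])

lemma rep2_match (x m : Char) (t : List Char) :
    rep2 x m (x :: x :: t) = m :: rep2 x m t := by
  simp [rep2]

-- the head of a replacement result is the old head or the marker
lemma rep2_head (x m c : Char) (t : List Char) :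
    ∃ h l', rep2 x m (c :: t) = h :: l' ∧ (h = c ∨ h = m) := by
  cases t with
  | nil => exact ⟨c, [], rfl, Or.inl rfl⟩
  | cons b t =>
    by_cases hp : c = x ∧ b = x
    · rcases hp with ⟨rfl, rfl⟩
      exact ⟨m, _, rep2_match _ _ _, Or.inr rfl⟩
    · exact ⟨c, rep2 x m (b :: t), rep2_pair_ne x m c b t hp, Or.inl rfl⟩

-- PySem.Chars.replace.go for the pattern [x,x] computes rep2
lemma go_eq_rep2 (x m : Char) : ∀ (fuel : Nat) (l acc : List Char), l.length ≤ fuel →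
    PySem.Chars.replace.go [x, x] [m] fuel l acc = acc.reverse ++ rep2 x m l := by
  intro fuel
  induction fuel with
  | zero =>
    intro l acc hl
    have hnil : l = [] := by cases l <;> simp_all
    subst hnil
    show acc.reverse ++ [] = acc.reverse ++ rep2 x m []
    rfl
  | succ n ih =>
    intro l acc hl
    cases l with
    | nil =>
      show acc.reverse = acc.reverse ++ rep2 x m []
      simp [rep2]
    | cons c t =>
      rw [show PySem.Chars.replace.go [x, x] [m] (n+1) (c :: t) acc =
            (if [x, x].isPrefixOf (c :: t) then
              PySem.Chars.replace.go [x, x] [m] n (List.drop 2 (c :: t)) ([m].reverse ++ acc)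
             else PySem.Chars.replace.go [x, x] [m] n t (c :: acc)) from rfl]
      by_cases hpre : [x, x].isPrefixOf (c :: t) = true
      · rw [if_pos hpre]
        cases t with
        | nil => exact absurd hpre (by simp [List.isPrefixOf])
        | cons b t' =>
          obtain ⟨h1, h2⟩ : x = c ∧ x = b := by simpa [List.isPrefixOf] using hpre
          subst h1; subst h2
          rw [ih (List.drop 2 (x :: x :: t')) ([m].reverse ++ acc) (by simp at hl ⊢; omega)]
          simp [rep2_match]
      · rw [if_neg (by simpa using hpre)]
        rw [ih t (c :: acc) (by simp at hl; omega)]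
        cases t with
        | nil => simp [rep2]
        | cons b t' =>
          have hnp : ¬(c = x ∧ b = x) := by
            intro ⟨h1, h2⟩
            subst h1; subst h2
            simp [List.isPrefixOf] at hpre
          rw [rep2_pair_ne x m c b t' hnp]
          simp

lemma replace_eq_rep2 (s : List Char) (x m : Char) :
    PySem.Chars.replace s [x, x] [m] = rep2 x m s := by
  rw [PySem.Chars.replace]
  rw [if_neg (by simp)]
  exact go_eq_rep2 x m s.length s [] (le_refl _)

-- the composite of the four replaces
def chain4 (cs : List Char) : List Char :=
  rep2 'd' '\x04' (rep2 'c' '\x03' (rep2 'b' '\x02' (rep2 'a' '\x01' cs)))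

lemma alt_eq_chain (s : String) :
    rom_flags_to_int_py_alt s = (chain4 s.toList).foldl (fun out ch => Int.lor out (romBitB ch)) 0 := by
  unfold rom_flags_to_int_py_alt chain4
  simp only [PySem.Str.toList_replace]
  rw [show ("aa" : String).toList = ['a','a'] from rfl, show ("bb" : String).toList = ['b','b'] from rfl,
      show ("cc" : String).toList = ['c','c'] from rfl, show ("dd" : String).toList = ['d','d'] from rfl,
      show ("\x01" : String).toList = ['\x01'] from rfl, show ("\x02" : String).toList = ['\x02'] from rfl,
      show ("\x03" : String).toList = ['\x03'] from rfl, show ("\x04" : String).toList = ['\x04'] from rfl]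
  rw [replace_eq_rep2, replace_eq_rep2, replace_eq_rep2, replace_eq_rep2]

-- chain4 on the four double-flag heads
lemma chain4_aa (t : List Char) : chain4 ('a' :: 'a' :: t) = '\x01' :: chain4 t := by
  unfold chain4
  rw [rep2_match, rep2_cons_ne 'b' _ _ (by decide), rep2_cons_ne 'c' _ _ (by decide),
      rep2_cons_ne 'd' _ _ (by decide)]

lemma chain4_bb (t : List Char) : chain4 ('b' :: 'b' :: t) = '\x02' :: chain4 t := by
  unfold chain4
  rw [rep2_cons_ne 'a' _ _ (by decide), rep2_cons_ne 'a' _ _ (by decide), rep2_match,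
      rep2_cons_ne 'c' _ _ (by decide), rep2_cons_ne 'd' _ _ (by decide)]

lemma chain4_cc (t : List Char) : chain4 ('c' :: 'c' :: t) = '\x03' :: chain4 t := by
  unfold chain4
  rw [rep2_cons_ne 'a' _ _ (by decide), rep2_cons_ne 'a' _ _ (by decide),
      rep2_cons_ne 'b' _ _ (by decide), rep2_cons_ne 'b' _ _ (by decide), rep2_match,
      rep2_cons_ne 'd' _ _ (by decide)]

lemma chain4_dd (t : List Char) : chain4 ('d' :: 'd' :: t) = '\x04' :: chain4 t := by
  unfold chain4
  rw [rep2_cons_ne 'a' _ _ (by decide), rep2_cons_ne 'a' _ _ (by decide),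
      rep2_cons_ne 'b' _ _ (by decide), rep2_cons_ne 'b' _ _ (by decide),
      rep2_cons_ne 'c' _ _ (by decide), rep2_cons_ne 'c' _ _ (by decide), rep2_match]

lemma chain4_single (c : Char) : chain4 [c] = [c] := by
  simp [chain4, rep2]

-- a head pair that is not a double passes through the four replaces
lemma chain4_cons₂ (c1 c2 : Char) (t : List Char)
    (haa : ¬(c1 = 'a' ∧ c2 = 'a')) (hbb : ¬(c1 = 'b' ∧ c2 = 'b'))
    (hcc : ¬(c1 = 'c' ∧ c2 = 'c')) (hdd : ¬(c1 = 'd' ∧ c2 = 'd')) :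
    chain4 (c1 :: c2 :: t) = c1 :: chain4 (c2 :: t) := by
  unfold chain4
  by_cases ha : c1 = 'a'
  · subst ha
    rw [rep2_pair_ne _ _ _ _ _ haa, rep2_cons_ne 'b' _ _ (by decide),
        rep2_cons_ne 'c' _ _ (by decide), rep2_cons_ne 'd' _ _ (by decide)]
  · by_cases hb : c1 = 'b'
    · subst hb
      have hc2 : c2 ≠ 'b' := fun h => hbb ⟨rfl, h⟩
      rw [rep2_cons_ne 'a' _ _ (by decide)]
      obtain ⟨h1, l1, he1, hh1⟩ := rep2_head 'a' '\x01' c2 t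
      have hh1b : h1 ≠ 'b' := by
        cases hh1 with
        | inl h => rw [h]; exact hc2
        | inr h => rw [h]; decide
      rw [he1, rep2_pair_ne 'b' _ _ _ _ (fun h => hh1b h.2), ← he1,
          rep2_cons_ne 'c' _ 'b' (by decide), rep2_cons_ne 'd' _ 'b' (by decide)]
    · by_cases hc : c1 = 'c'
      · subst hc
        have hc2 : c2 ≠ 'c' := fun h => hcc ⟨rfl, h⟩
        rw [rep2_cons_ne 'a' _ _ (by decide), rep2_cons_ne 'b' _ _ (by decide)]
        obtain ⟨h1, l1, he1, hh1⟩ := rep2_head 'a' '\x01' c2 t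
        rw [he1]
        obtain ⟨h2, l2, he2, hh2⟩ := rep2_head 'b' '\x02' h1 l1
        have hh2c : h2 ≠ 'c' := by
          cases hh2 with
          | inl h =>
            rw [h]
            cases hh1 with
            | inl h' => rw [h']; exact hc2
            | inr h' => rw [h']; decide
          | inr h => rw [h]; decide
        rw [he2, rep2_pair_ne 'c' _ _ _ _ (fun h => hh2c h.2), ← he2, ← he1,
            rep2_cons_ne 'd' _ 'c' (by decide)]
      · by_cases hd : c1 = 'd'
        · subst hd
          have hc2 : c2 ≠ 'd' := fun h => hdd ⟨rfl, h⟩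
          rw [rep2_cons_ne 'a' _ _ (by decide), rep2_cons_ne 'b' _ _ (by decide),
              rep2_cons_ne 'c' _ _ (by decide)]
          obtain ⟨h1, l1, he1, hh1⟩ := rep2_head 'a' '\x01' c2 t
          rw [he1]
          obtain ⟨h2, l2, he2, hh2⟩ := rep2_head 'b' '\x02' h1 l1
          rw [he2]
          obtain ⟨h3, l3, he3, hh3⟩ := rep2_head 'c' '\x03' h2 l2
          have hh3d : h3 ≠ 'd' := by
            cases hh3 with
            | inl h =>
              rw [h]
              cases hh2 with
              | inl h' =>
                rw [h']
                cases hh1 with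
                | inl h'' => rw [h'']; exact hc2
                | inr h'' => rw [h'']; decide
              | inr h' => rw [h']; decide
            | inr h => rw [h]; decide
          rw [he3, rep2_pair_ne 'd' _ _ _ _ (fun h => hh3d h.2), ← he3, ← he2, ← he1]
        · rw [rep2_cons_ne 'a' _ _ ha, rep2_cons_ne 'b' _ _ hb, rep2_cons_ne 'c' _ _ hc,
              rep2_cons_ne 'd' _ _ hd]

lemma int_lor_zero (a : Int) : Int.lor a 0 = a := by
  cases a
  · show Int.ofNat (Nat.lor _ 0) = _
    apply congrArg; exact Nat.or_zero _
  · show Int.negSucc (Nat.ldiff _ 0) = _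
    apply congrArg
    apply Nat.eq_of_testBit_eq; intro i; simp [Nat.testBit_ldiff]

lemma char_le_iff (a c : Char) : (a ≤ c) ↔ (a.toNat ≤ c.toNat) := Iff.rfl

-- A's single-character branch equals OR-ing B's bit, for characters in the domain
lemma bit_single (c : Char) (hdom : pvDomChar c = true) (r : Int) :
    (if 'A' ≤ c ∧ c ≤ 'Z' then Int.lor r (pyShl1 (c.toNat - 65))
     else if 'a' ≤ c ∧ c ≤ 'z' then Int.lor r (pyShl1 (c.toNat - 97))
     else r) = Int.lor r (romBitB c) := by
  have hdn : 32 ≤ c.toNat ∨ c.toNat = 9 ∨ c.toNat = 10 ∨ c.toNat = 13 := by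
    simp [pvDomChar] at hdom; omega
  simp only [romBitB, char_le_iff, show ('A').toNat = 65 from rfl, show ('Z').toNat = 90 from rfl,
    show ('a').toNat = 97 from rfl, show ('z').toNat = 122 from rfl]
  by_cases h1 : 65 ≤ c.toNat ∧ c.toNat ≤ 90
  · simp [h1]
  · by_cases h2 : 97 ≤ c.toNat ∧ c.toNat ≤ 122
    · simp [h1, h2]
    · have h3 : ¬(1 ≤ c.toNat ∧ c.toNat ≤ 4) := by omega
      simp [h1, h2, h3, int_lor_zero]

lemma main_lemma : ∀ (n : Nat) (cs : List Char) (r : Int), cs.length ≤ n →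
    (∀ c ∈ cs, pvDomChar c = true) →
    romLoopA cs r = (chain4 cs).foldl (fun out ch => Int.lor out (romBitB ch)) r := by
  intro n
  induction n with
  | zero =>
    intro cs r hl _
    have hnil : cs = [] := by cases cs <;> simp_all
    subst hnil
    simp [romLoopA, chain4, rep2]
  | succ n ih =>
    intro cs r hl hdom
    match cs with
    | [] => simp [romLoopA, chain4, rep2]
    | [c] =>
      rw [chain4_single]
      simp only [romLoopA, List.foldl]
      exact bit_single c (hdom c (by simp)) r
    | c1 :: c2 :: t =>
      by_cases hmem : [c1, c2] ∈ [['a','a'], ['b','b'], ['c','c'], ['d','d']]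
      · simp only [List.mem_cons, List.cons.injEq, List.not_mem_nil,
          or_false, and_true] at hmem
        rcases hmem with ⟨rfl, rfl⟩ | ⟨rfl, rfl⟩ | ⟨rfl, rfl⟩ | ⟨rfl, rfl⟩
        · rw [chain4_aa]
          simp only [romLoopA, List.foldl]
          rw [if_pos (by decide), if_pos (by decide)]
          rw [show romBitB '\x01' = pyShl1 26 from by decide]
          exact ih t _ (by simp at hl ⊢; omega) (fun c hc => hdom c (by simp [hc]))
        · rw [chain4_bb]
          simp only [romLoopA, List.foldl]
          rw [if_pos (by decide), if_neg (by decide), if_pos (by decide)]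
          rw [show romBitB '\x02' = pyShl1 27 from by decide]
          exact ih t _ (by simp at hl ⊢; omega) (fun c hc => hdom c (by simp [hc]))
        · rw [chain4_cc]
          simp only [romLoopA, List.foldl]
          rw [if_pos (by decide), if_neg (by decide), if_neg (by decide), if_pos (by decide)]
          rw [show romBitB '\x03' = pyShl1 28 from by decide]
          exact ih t _ (by simp at hl ⊢; omega) (fun c hc => hdom c (by simp [hc]))
        · rw [chain4_dd]
          simp only [romLoopA, List.foldl]
          rw [if_pos (by decide), if_neg (by decide), if_neg (by decide), if_neg (by decide),
              if_pos (by decide)]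
          rw [show romBitB '\x04' = pyShl1 29 from by decide]
          exact ih t _ (by simp at hl ⊢; omega) (fun c hc => hdom c (by simp [hc]))
      · have hmem' := hmem
        simp only [List.mem_cons, List.cons.injEq, List.not_mem_nil,
          or_false, and_true, not_or] at hmem'
        rw [chain4_cons₂ c1 c2 t hmem'.1 hmem'.2.1 hmem'.2.2.1 hmem'.2.2.2]
        simp only [romLoopA, List.foldl]
        rw [if_neg hmem]
        rw [bit_single c1 (hdom c1 (by simp)) r]
        exact ih (c2 :: t) _ (by simp at hl ⊢; omega) (fun c hc => hdom c (by simp at hc ⊢; tauto))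

-- ===== VERDICT (by name: the statement is the Claim_ definition above) =====
theorem rom_flags_to_int_py_spec : Claim_equal_rom_flags_to_int_py := by
  intro s hdom
  unfold Spec_rom_flags_to_int_py rom_flags_to_int_py
  rw [alt_eq_chain]
  by_cases h0 : s.toList = [] ∨ s.toList = ['0']
  · rw [if_pos h0]
    rcases h0 with h | h <;> rw [h] <;> decide
  · rw [if_neg h0]
    refine main_lemma s.toList.length s.toList 0 (le_refl _) ?_
    intro c hc
    have := hdom
    simp only [Dom_rom_flags_to_int_py, pvDomStr, List.all_eq_true] at this
    exact this c hc
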